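-- pv_equiv track=rewrite | github.com/MSebeke/Master | CreatingHairpinMotifs.py | CheckBPContinuityGNRA
-- ===== SOURCE A (Python) =====
-- def CheckBPContinuityGNRA(x): #GNRA Continuity can also be used for T-Loops as they also have the same continuity criteria
--     DiffList=[]
--     for i in range(len(x)-1):
--         Base_Position=int(x[i])
--         Next_Base=int(x[i+1])
--         Diff = Next_Base - Base_Position
--         DiffList.append(Diff)
--     DiffSet=set(DiffList)
--     try:
--         DiffSet.remove(1)
--         if len(DiffSet) == 0:
--             return True
--         if len(DiffSet) != 0:
--             return False
--     except:
--         return False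
-- ===== SOURCE B (Python) =====
-- def CheckBPContinuityGNRA(x):
--     nums = [int(v) for v in x]
--     if len(nums) < 2:
--         return False
--     return nums == list(range(nums[0], nums[0] + len(nums)))
-- ===== Notes on version B (the rewrite author's own statement) =====
-- stated objective: simpler
-- what changed: Instead of building a list of pairwise differences, turning it into a set and removing 1 inside a try/except, B converts the elements and compares the list against the consecutive integer range starting at its first element.
import Mathlib
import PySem

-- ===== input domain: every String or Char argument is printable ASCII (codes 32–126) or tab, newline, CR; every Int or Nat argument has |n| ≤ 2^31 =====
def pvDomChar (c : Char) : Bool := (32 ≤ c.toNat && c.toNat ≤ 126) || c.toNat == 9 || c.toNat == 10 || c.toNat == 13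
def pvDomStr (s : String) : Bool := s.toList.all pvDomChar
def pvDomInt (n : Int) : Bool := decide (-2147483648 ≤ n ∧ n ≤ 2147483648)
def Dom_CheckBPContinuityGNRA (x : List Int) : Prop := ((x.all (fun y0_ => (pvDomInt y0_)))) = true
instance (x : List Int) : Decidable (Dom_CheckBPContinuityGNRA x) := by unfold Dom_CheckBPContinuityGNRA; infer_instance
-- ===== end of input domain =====

-- B replaces A's pairwise-difference list + set + try/except with a direct comparison of the
-- list against the consecutive integer range starting at its first element (objective: simpler).


-- ===== PORT A =====
def CheckBPContinuityGNRA (x : List Int) : Bool :=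
  -- DiffList built by the loop 'for i in range(len(x)-1): DiffList.append(int(x[i+1]) - int(x[i]))'
  let diffList : List Int :=
    (PySem.List.pyRange 0 ((x.length : Int) - 1)).foldl
      (fun acc i => acc ++ [PySem.List.pyGetD x (i + 1) 0 - PySem.List.pyGetD x i 0]) []
  let diffSet : PySem.Set Int := PySem.Set.ofList diffList
  -- 'try: DiffSet.remove(1) … except: return False' (remove? none = KeyError)
  match PySem.Set.remove? diffSet 1 with
  | none => false
  | some s => if PySem.Set.len s = 0 then true else false

-- ===== PORT B =====
def CheckBPContinuityGNRA_alt (x : List Int) : Bool :=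
  -- 'nums = [int(v) for v in x]' is the identity on a List Int
  if x.length < 2 then false
  else decide (x = PySem.List.pyRange (PySem.List.pyGetD x 0 0)
                    (PySem.List.pyGetD x 0 0 + (x.length : Int)))

-- ===== PRECONDITION & SPEC =====
def Spec_CheckBPContinuityGNRA (x : List Int) (out : Bool) : Prop := out = CheckBPContinuityGNRA_alt x
instance (x : List Int) (out : Bool) : Decidable (Spec_CheckBPContinuityGNRA x out) := by unfold Spec_CheckBPContinuityGNRA; infer_instance

-- ===== CLAIM (what is proved, stated in full; the proofs are below) =====
def Claim_equal_CheckBPContinuityGNRA : Prop := ∀ (x : List Int), Dom_CheckBPContinuityGNRA x → Spec_CheckBPContinuityGNRA x (CheckBPContinuityGNRA x)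

-- ===== LEMMAS AND PROOFS =====

-- the pairwise-difference list of A, written as structural recursion
def dsR : List Int → List Int
  | a :: b :: t => (b - a) :: dsR (b :: t)
  | _ => []

-- adjacent elements increase by exactly 1
def consecB : List Int → Bool
  | a :: b :: t => (b == a + 1) && consecB (b :: t)
  | _ => true

lemma dsR_eq (x : List Int) :
    (PySem.List.pyRange 0 ((x.length : Int) - 1)).map
      (fun i => PySem.List.pyGetD x (i + 1) 0 - PySem.List.pyGetD x i 0) = dsR x := by
  match x with
  | [] => simp [PySem.List.pyRange, dsR]
  | [a] => simp [PySem.List.pyRange, dsR]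
  | a :: b :: t =>
    have h1 : ((a :: b :: t).length : Int) - 1 = ((t.length + 1 : Nat) : Int) := by simp
    rw [h1, PySem.List.pyRange_zero_natCast, List.range_succ_eq_map]
    simp only [List.map_cons, List.map_map]
    rw [show dsR (a :: b :: t) = (b - a) :: dsR (b :: t) from rfl]
    congr 1
    · simp [PySem.List.pyGetD_ofNat']
    · rw [← dsR_eq (b :: t),
        show ((b :: t).length : Int) - 1 = ((t.length : Nat) : Int) by simp,
        PySem.List.pyRange_zero_natCast, List.map_map]
      refine List.map_congr_left (fun k _ => ?_)
      simp only [Function.comp_apply]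
      rw [show ((k.succ : Nat) : Int) + 1 = ((k + 2 : Nat) : Int) by push_cast; ring]
      rw [show ((k.succ : Nat) : Int) = ((k + 1 : Nat) : Int) by push_cast; ring]
      rw [show ((k : Nat) : Int) + 1 = ((k + 1 : Nat) : Int) by push_cast; ring]
      rw [PySem.List.pyGetD_natCast, PySem.List.pyGetD_natCast, PySem.List.pyGetD_natCast,
        PySem.List.pyGetD_natCast]
      simp

lemma A_eq (x : List Int) :
    CheckBPContinuityGNRA x = decide (dsR x ≠ [] ∧ ∀ d ∈ dsR x, d = 1) := by
  unfold CheckBPContinuityGNRA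
  dsimp only
  rw [PySem.List.foldl_append_singleton_eq_map, List.nil_append, dsR_eq]
  by_cases h1 : (1 : Int) ∈ PySem.Set.ofList (dsR x)
  · rw [PySem.Set.remove?_of_mem h1]
    have hne : dsR x ≠ [] := by
      rintro he; rw [he] at h1; simp [PySem.Set.ofList] at h1
    by_cases hall : ∀ d ∈ dsR x, d = 1
    · have hd0 : PySem.Set.discard (PySem.Set.ofList (dsR x)) 1 = [] := by
        rw [List.eq_nil_iff_forall_not_mem]
        intro y hy
        rw [PySem.Set.mem_discard] at hy
        exact hy.2 (hall y ((PySem.Set.mem_ofList _ _).1 hy.1))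
      simp [hd0, PySem.Set.len, hne]
      exact hall
    · obtain ⟨d, hd, hd1⟩ := by push Not at hall; exact hall
      have hdm : d ∈ PySem.Set.discard (PySem.Set.ofList (dsR x)) 1 := by
        rw [PySem.Set.mem_discard]; exact ⟨(PySem.Set.mem_ofList _ _).2 hd, hd1⟩
      have hlen : PySem.Set.len (PySem.Set.discard (PySem.Set.ofList (dsR x)) 1) ≠ 0 := by
        intro h0
        rw [PySem.Set.len] at h0
        have h0' : ((PySem.Set.ofList (dsR x)).discard 1).length = 0 := by exact_mod_cast h0
        rw [List.length_eq_zero_iff] at h0'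
        simp [h0'] at hdm
      simp only [hlen, if_false]
      symm; simp; intro _; exact ⟨d, hd, hd1⟩
  · rw [(PySem.Set.remove?_eq_none_iff _ _).2 h1]
    have hno : ¬ (dsR x ≠ [] ∧ ∀ d ∈ dsR x, d = 1) := by
      rintro ⟨hne, hall⟩
      rcases List.exists_mem_of_ne_nil _ hne with ⟨d, hd⟩
      exact h1 ((PySem.Set.mem_ofList _ _).2 (hall d hd ▸ hd))
    simp [hno]

lemma dsR_all_one (x : List Int) : (∀ d ∈ dsR x, d = 1) ↔ consecB x = true := by
  match x with
  | [] => simp [dsR, consecB]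
  | [a] => simp [dsR, consecB]
  | a :: b :: t =>
    rw [show dsR (a :: b :: t) = (b - a) :: dsR (b :: t) from rfl,
        show consecB (a :: b :: t) = ((b == a + 1) && consecB (b :: t)) from rfl]
    simp only [Bool.and_eq_true, beq_iff_eq]
    rw [← dsR_all_one (b :: t)]
    constructor
    · intro h
      refine ⟨?_, fun d hd => h d (by simp [hd])⟩
      have h1 := h (b - a) (by simp)
      omega
    · rintro ⟨h1, h2⟩ d hd
      rcases List.mem_cons.1 hd with he | hm
      · omega
      · exact h2 d hm

lemma range_iff_consec (a : Int) (y : List Int) :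
    (a :: y = PySem.List.pyRange a (a + ((y.length + 1 : Nat) : Int))) ↔ consecB (a :: y) = true := by
  have hcons : PySem.List.pyRange a (a + ((y.length + 1 : Nat) : Int))
      = a :: PySem.List.pyRange (a + 1) ((a + 1) + ((y.length : Nat) : Int)) := by
    rw [PySem.List.pyRange_one_cons (by push_cast; omega)]
    congr 1; push_cast; ring
  rw [hcons]
  match y with
  | [] => simp [consecB, PySem.List.pyRange]
  | b :: t =>
    have hr2 : PySem.List.pyRange (a + 1) ((a + 1) + (((b :: t).length : Nat) : Int))
        = (a + 1) :: PySem.List.pyRange (a + 2) ((a + 2) + ((t.length : Nat) : Int)) := by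
      rw [PySem.List.pyRange_one_cons (by push_cast [List.length_cons]; omega)]
      congr 1; push_cast [List.length_cons]; ring
    rw [show consecB (a :: b :: t) = ((b == a + 1) && consecB (b :: t)) from rfl]
    by_cases hb : b = a + 1
    · subst hb
      simp only [List.cons.injEq, true_and, beq_self_eq_true, Bool.true_and]
      have hIH := range_iff_consec (a + 1) t
      simp only [List.length_cons] at *
      push_cast at hIH ⊢
      exact hIH
    · constructor
      · intro h
        rw [hr2] at h
        simp only [List.cons.injEq] at h
        exact absurd h.2.1 hb
      · intro h
        simp only [Bool.and_eq_true, beq_iff_eq] at h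
        exact absurd h.1 hb

-- ===== VERDICT (by name: the statement is the Claim_ definition above) =====
theorem CheckBPContinuityGNRA_spec : Claim_equal_CheckBPContinuityGNRA := by
  intro x _
  unfold Spec_CheckBPContinuityGNRA
  rw [A_eq]
  match x with
  | [] => simp [dsR, CheckBPContinuityGNRA_alt]
  | [a] => simp [dsR, CheckBPContinuityGNRA_alt]
  | a :: b :: t =>
    have hne : dsR (a :: b :: t) ≠ [] := by simp [dsR]
    have hr := range_iff_consec a (b :: t)
    have hget : PySem.List.pyGetD (a :: b :: t) 0 0 = a := by
      simp [PySem.List.pyGetD, PySem.List.pyIdx?, PySem.List.pyGet?,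
        show (0 : Int) ≤ (t.length : Int) + 1 by positivity]
    simp only [CheckBPContinuityGNRA_alt, List.length_cons, hget]
    rw [if_neg (by omega)]
    push_cast [List.length_cons] at hr
    simp [hne, dsR_all_one, hr]
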